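-- pv_equiv track=rewrite | github.com/dwalleck/kiro-control-center | .github/scripts/post-review-comments.py | _unquote_diff_path
-- ===== SOURCE A (Python) =====
-- _C_ESCAPE = {
--     "a": 0x07, "b": 0x08, "t": 0x09, "n": 0x0A,
--     "v": 0x0B, "f": 0x0C, "r": 0x0D,
--     '"': 0x22, "\\": 0x5C,
-- }
--
-- def _unquote_diff_path(inner):
--     """Decode the inner body of a git-quoted diff path into a str.
--
--     Git's quoted form (documented in `git config core.quotepath`) wraps the
--     path in double quotes and emits:
--       - C escapes (\\t, \\n, \\\", \\\\, etc.)
--       - Three-digit octal triplets (\\303\\251) for each non-ASCII byte.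
--
--     The octal bytes assemble into the UTF-8 encoding of the original path,
--     so we build a bytearray and decode it as UTF-8 at the end. Anything we
--     don't recognize is preserved verbatim; a broken path is still better
--     than silently skipping a finding.
--     """
--     buf = bytearray()
--     i = 0
--     n = len(inner)
--     while i < n:
--         c = inner[i]
--         if c != "\\":
--             buf.extend(c.encode("utf-8"))
--             i += 1
--             continue
--         if i + 1 >= n:
--             buf.append(ord("\\"))
--             break
--         nxt = inner[i + 1]
--         if nxt.isdigit() and i + 3 < n and inner[i + 2].isdigit() and inner[i + 3].isdigit():
--             try:
--                 buf.append(int(inner[i + 1:i + 4], 8))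
--                 i += 4
--                 continue
--             except ValueError:
--                 pass
--         if nxt in _C_ESCAPE:
--             buf.append(_C_ESCAPE[nxt])
--             i += 2
--             continue
--         buf.extend(nxt.encode("utf-8"))
--         i += 2
--     return buf.decode("utf-8", errors="replace")
-- ===== SOURCE B (Python) =====
-- import re
--
-- _C_ESCAPE = {
--     "a": 0x07, "b": 0x08, "t": 0x09, "n": 0x0A,
--     "v": 0x0B, "f": 0x0C, "r": 0x0D,
--     '"': 0x22, "\\": 0x5C,
-- }
--
-- _TOKEN = re.compile(
--     r'\\(?P<oct>[0-3][0-7]{2})'      # octal triplet that fits in a byte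
--     r'|\\(?P<esc>[abtnvfr"\\])'      # known C escape
--     r'|\\(?P<end>\Z)'                 # lone trailing backslash
--     r'|\\(?P<any>.)'                 # backslash + anything else, kept verbatim
--     r'|(?P<lit>[^\\]+)',             # literal run
--     re.DOTALL,
-- )
--
-- def _unquote_diff_path(inner):
--     buf = bytearray()
--     for m in _TOKEN.finditer(inner):
--         kind = m.lastgroup
--         if kind == "oct":
--             buf.append(int(m.group("oct"), 8))
--         elif kind == "esc":
--             buf.append(_C_ESCAPE[m.group("esc")])
--         elif kind == "end":
--             buf.append(0x5C)
--         elif kind == "any":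
--             buf.extend(m.group("any").encode("utf-8"))
--         else:
--             buf.extend(m.group("lit").encode("utf-8"))
--     return buf.decode("utf-8", errors="replace")
-- ===== Notes on version B (the rewrite author's own statement) =====
-- stated objective: idiomatic
-- what changed: A's index-juggling while-loop with manual lookahead and a try/except around int(...,8) is replaced by a single regex tokenizer (re.finditer with ordered alternation: octal triplet [0-3][0-7]{2}, C escape, trailing backslash, escaped char, literal run) whose matches are mapped to bytes.
import Mathlib
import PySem

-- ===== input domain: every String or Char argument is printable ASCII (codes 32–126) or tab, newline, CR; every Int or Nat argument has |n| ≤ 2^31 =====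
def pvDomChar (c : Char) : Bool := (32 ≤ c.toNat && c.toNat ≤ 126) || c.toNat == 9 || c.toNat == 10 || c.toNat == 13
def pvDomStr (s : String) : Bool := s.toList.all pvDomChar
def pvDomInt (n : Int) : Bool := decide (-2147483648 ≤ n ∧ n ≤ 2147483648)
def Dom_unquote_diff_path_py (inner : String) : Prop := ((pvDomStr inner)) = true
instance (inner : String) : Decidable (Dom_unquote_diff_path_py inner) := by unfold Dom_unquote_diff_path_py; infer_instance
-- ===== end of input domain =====

-- B re-implements A's index-juggling while-loop as a single-pass tokenizer (a regex finditer in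
-- Python, a token list here); same return value, structurally different scan.

-- ===== PORT A =====

-- shared with port B: c.encode("utf-8") as a list of byte values
def pvEncChar (c : Char) : List Nat := (String.utf8EncodeChar c).map (·.toNat)

-- shared with port B: the _C_ESCAPE dict as a lookup (membership test + indexing)
def pvCEscape? (c : Char) : Option Nat :=
  if c = 'a' then some 0x07 else if c = 'b' then some 0x08 else if c = 't' then some 0x09
  else if c = 'n' then some 0x0A else if c = 'v' then some 0x0B else if c = 'f' then some 0x0C
  else if c = 'r' then some 0x0D else if c = '"' then some 0x22 else if c = '\\' then some 0x5C
  else none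

-- shared with port B: bytes.decode("utf-8", errors="replace"); exact CPython semantics
-- (maximal-subpart consumption, one U+FFFD per error)
def pvUtf8Cont (b : Nat) : Bool := 128 ≤ b && b ≤ 191

def pvUtf8DecodeReplace : List Nat → List Char
  | [] => []
  | b :: rest =>
    if b < 128 then Char.ofNat b :: pvUtf8DecodeReplace rest
    else if b < 194 then Char.ofNat 0xFFFD :: pvUtf8DecodeReplace rest
    else if b < 224 then
      match rest with
      | b1 :: rest1 =>
        if pvUtf8Cont b1 then Char.ofNat ((b - 192) * 64 + (b1 - 128)) :: pvUtf8DecodeReplace rest1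
        else Char.ofNat 0xFFFD :: pvUtf8DecodeReplace (b1 :: rest1)
      | [] => [Char.ofNat 0xFFFD]
    else if b < 240 then
      let lo := if b = 224 then 160 else 128
      let hi := if b = 237 then 159 else 191
      match rest with
      | b1 :: rest1 =>
        if lo ≤ b1 && b1 ≤ hi then
          match rest1 with
          | b2 :: rest2 =>
            if pvUtf8Cont b2 then
              Char.ofNat ((b - 224) * 4096 + (b1 - 128) * 64 + (b2 - 128)) :: pvUtf8DecodeReplace rest2
            else Char.ofNat 0xFFFD :: pvUtf8DecodeReplace (b2 :: rest2)
          | [] => [Char.ofNat 0xFFFD]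
        else Char.ofNat 0xFFFD :: pvUtf8DecodeReplace (b1 :: rest1)
      | [] => [Char.ofNat 0xFFFD]
    else if b < 245 then
      let lo := if b = 240 then 144 else 128
      let hi := if b = 244 then 143 else 191
      match rest with
      | b1 :: rest1 =>
        if lo ≤ b1 && b1 ≤ hi then
          match rest1 with
          | b2 :: rest2 =>
            if pvUtf8Cont b2 then
              match rest2 with
              | b3 :: rest3 =>
                if pvUtf8Cont b3 then
                  Char.ofNat ((b - 240) * 262144 + (b1 - 128) * 4096 + (b2 - 128) * 64 + (b3 - 128)) ::
                    pvUtf8DecodeReplace rest3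
                else Char.ofNat 0xFFFD :: pvUtf8DecodeReplace (b3 :: rest3)
              | [] => [Char.ofNat 0xFFFD]
            else Char.ofNat 0xFFFD :: pvUtf8DecodeReplace (b2 :: rest2)
          | [] => [Char.ofNat 0xFFFD]
        else Char.ofNat 0xFFFD :: pvUtf8DecodeReplace (b1 :: rest1)
      | [] => [Char.ofNat 0xFFFD]
    else Char.ofNat 0xFFFD :: pvUtf8DecodeReplace rest
termination_by l => l.length
decreasing_by all_goals simp_wf
              all_goals omega

-- Python str.isdigit; exact on the ASCII domain Dom_
def pvIsDigit (c : Char) : Bool := 48 ≤ c.toNat && c.toNat ≤ 57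

-- A's try-block: int(three digit chars, 8), then bytearray.append (which raises ValueError
-- outside 0..255); some = the appended byte, none = the swallowed ValueError
def pvAOct? (d1 d2 d3 : Char) : Option Nat :=
  match PySem.Int.ofCharsBase? [d1, d2, d3] 8 with
  | some v => if 0 ≤ v ∧ v < 256 then some v.toNat else none
  | none => none

-- A's while-loop over the string, one step per iteration, as structural recursion
def pvALoop : List Char → List Nat
  | [] => []
  | c :: rest =>
    if c = '\\' then
      match rest with
      | [] => [0x5C]
      | nxt :: rest1 =>
        match rest1 with
        | d2 :: d3 :: rest3 =>
          if pvIsDigit nxt && pvIsDigit d2 && pvIsDigit d3 then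
            match pvAOct? nxt d2 d3 with
            | some v => v :: pvALoop rest3
            | none =>
              match pvCEscape? nxt with
              | some b => b :: pvALoop (d2 :: d3 :: rest3)
              | none => pvEncChar nxt ++ pvALoop (d2 :: d3 :: rest3)
          else
            match pvCEscape? nxt with
            | some b => b :: pvALoop (d2 :: d3 :: rest3)
            | none => pvEncChar nxt ++ pvALoop (d2 :: d3 :: rest3)
        | [d2] =>
          match pvCEscape? nxt with
          | some b => b :: pvALoop [d2]
          | none => pvEncChar nxt ++ pvALoop [d2]
        | [] =>
          match pvCEscape? nxt with
          | some b => b :: pvALoop []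
          | none => pvEncChar nxt ++ pvALoop []
    else pvEncChar c ++ pvALoop rest
termination_by l => l.length
decreasing_by all_goals simp_wf
              all_goals omega

def unquote_diff_path_py (inner : String) : String :=
  String.ofList (pvUtf8DecodeReplace (pvALoop inner.toList))

-- ===== PORT B =====

-- the regex alternative \\[0-3][0-7]{2}: some = its byte value
def pvBOct? (d1 d2 d3 : Char) : Option Nat :=
  if (48 ≤ d1.toNat && d1.toNat ≤ 51) && (48 ≤ d2.toNat && d2.toNat ≤ 55) &&
     (48 ≤ d3.toNat && d3.toNat ≤ 55) then
    some ((d1.toNat - 48) * 64 + (d2.toNat - 48) * 8 + (d3.toNat - 48))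
  else none

inductive PvTok where
  | oct : Nat → PvTok
  | esc : Nat → PvTok
  | bs : PvTok
  | anyc : Char → PvTok
  | lit : List Char → PvTok
deriving DecidableEq, Repr

-- B's finditer: ordered alternation — octal triplet, C escape, trailing backslash,
-- backslash + any char, literal run [^\\]+
def pvTokenize : List Char → List PvTok
  | [] => []
  | '\\' :: [] => [PvTok.bs]
  | '\\' :: d1 :: d2 :: d3 :: rest3 =>
    match pvBOct? d1 d2 d3 with
    | some v => PvTok.oct v :: pvTokenize rest3
    | none =>
      match pvCEscape? d1 with
      | some b => PvTok.esc b :: pvTokenize (d2 :: d3 :: rest3)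
      | none => PvTok.anyc d1 :: pvTokenize (d2 :: d3 :: rest3)
  | '\\' :: d1 :: rest1 =>
    match pvCEscape? d1 with
    | some b => PvTok.esc b :: pvTokenize rest1
    | none => PvTok.anyc d1 :: pvTokenize rest1
  | c :: rest =>
    PvTok.lit (c :: rest.takeWhile (fun x => x != '\\')) ::
      pvTokenize (rest.dropWhile (fun x => x != '\\'))
termination_by l => l.length
decreasing_by
  all_goals simp_wf
  all_goals try omega
  have := List.length_dropWhile_le (fun x => x != '\\') rest
  omega

-- the loop body of B's finditer loop: bytes appended for one match
def pvTokBytes : PvTok → List Nat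
  | PvTok.oct v => [v]
  | PvTok.esc b => [b]
  | PvTok.bs => [0x5C]
  | PvTok.anyc c => pvEncChar c
  | PvTok.lit cs => cs.flatMap pvEncChar

def unquote_diff_path_py_alt (inner : String) : String :=
  String.ofList (pvUtf8DecodeReplace ((pvTokenize inner.toList).flatMap pvTokBytes))

-- ===== PRECONDITION & SPEC =====
def Spec_unquote_diff_path_py (inner : String) (out : String) : Prop := out = unquote_diff_path_py_alt inner
instance (inner : String) (out : String) : Decidable (Spec_unquote_diff_path_py inner out) := by unfold Spec_unquote_diff_path_py; infer_instance

-- ===== CLAIM (what is proved, stated in full; the proofs are below) =====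
def Claim_equal_unquote_diff_path_py : Prop := ∀ (inner : String), Dom_unquote_diff_path_py inner → Spec_unquote_diff_path_py inner (unquote_diff_path_py inner)

-- ===== LEMMAS AND PROOFS =====

-- on three decimal digits, A's try-int(·,8)-append agrees with B's [0-3][0-7]{2} alternative
lemma pvOct_bridge_fin : ∀ (a b c : Fin 10),
    pvAOct? (Char.ofNat (48 + a)) (Char.ofNat (48 + b)) (Char.ofNat (48 + c)) =
    pvBOct? (Char.ofNat (48 + a)) (Char.ofNat (48 + b)) (Char.ofNat (48 + c)) := by
  decide

lemma pvChar_eq_ofNat_of_toNat {c : Char} {n : Nat} (h : c.toNat = n) : c = Char.ofNat n := by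
  subst h; exact (Char.ofNat_toNat c).symm

lemma pvOct_bridge {d1 d2 d3 : Char}
    (h : (pvIsDigit d1 && pvIsDigit d2 && pvIsDigit d3) = true) :
    pvAOct? d1 d2 d3 = pvBOct? d1 d2 d3 := by
  simp [pvIsDigit, Bool.and_eq_true, decide_eq_true_eq] at h
  obtain ⟨⟨⟨h1a, h1b⟩, h2a, h2b⟩, h3a, h3b⟩ := h
  have e1 : d1 = Char.ofNat (48 + (⟨d1.toNat - 48, by omega⟩ : Fin 10)) :=
    pvChar_eq_ofNat_of_toNat (by simp; omega)
  have e2 : d2 = Char.ofNat (48 + (⟨d2.toNat - 48, by omega⟩ : Fin 10)) :=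
    pvChar_eq_ofNat_of_toNat (by simp; omega)
  have e3 : d3 = Char.ofNat (48 + (⟨d3.toNat - 48, by omega⟩ : Fin 10)) :=
    pvChar_eq_ofNat_of_toNat (by simp; omega)
  rw [e1, e2, e3]
  exact pvOct_bridge_fin _ _ _

-- A's loop passes straight over a backslash-free run
lemma pvALoop_run (t d : List Char) (h : ∀ x ∈ t, x ≠ '\\') :
    pvALoop (t ++ d) = t.flatMap pvEncChar ++ pvALoop d := by
  induction t with
  | nil => simp
  | cons c t ih =>
    have hc : c ≠ '\\' := h c (by simp)
    rw [List.cons_append]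
    rw [pvALoop.eq_def]
    simp only [if_neg hc, List.flatMap_cons, List.append_assoc]
    rw [ih (fun x hx => h x (by simp [hx]))]

-- if B's octal alternative matched, the three chars are decimal digits
lemma pvBOct_digits {d1 d2 d3 : Char} {v : Nat} (h : pvBOct? d1 d2 d3 = some v) :
    (pvIsDigit d1 && pvIsDigit d2 && pvIsDigit d3) = true := by
  simp only [pvBOct?] at h
  split at h
  · rename_i hg
    simp only [Bool.and_eq_true, decide_eq_true_eq] at hg
    simp only [pvIsDigit, Bool.and_eq_true, decide_eq_true_eq]
    omega
  · exact absurd h (by simp)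

lemma pvLoop_eq (l : List Char) : pvALoop l = (pvTokenize l).flatMap pvTokBytes := by
  induction l using pvTokenize.induct with
  | case1 => simp [pvALoop, pvTokenize]
  | case2 => simp [pvALoop, pvTokenize, pvTokBytes]
  | case3 d1 d2 d3 rest3 v hoct ih =>
    have hd := pvBOct_digits hoct
    rw [pvALoop.eq_def, pvTokenize.eq_def]
    simp [hd, pvOct_bridge hd, hoct, pvTokBytes, ih]
  | case4 d1 d2 d3 rest3 hoct b hesc ih =>
    rw [pvALoop.eq_def, pvTokenize.eq_def]
    by_cases hd : (pvIsDigit d1 && pvIsDigit d2 && pvIsDigit d3) = true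
    · simp [hd, pvOct_bridge hd, hoct, hesc, pvTokBytes, ih]
    · simp [hd, hoct, hesc, pvTokBytes, ih]
  | case5 d1 d2 d3 rest3 hoct hesc ih =>
    rw [pvALoop.eq_def, pvTokenize.eq_def]
    by_cases hd : (pvIsDigit d1 && pvIsDigit d2 && pvIsDigit d3) = true
    · simp [hd, pvOct_bridge hd, hoct, hesc, pvTokBytes, ih]
    · simp [hd, hoct, hesc, pvTokBytes, ih]
  | case6 d1 rest1 hshape b hesc ih =>
    rw [pvALoop.eq_def, pvTokenize.eq_def]
    match rest1, hshape with
    | [], _ => simp [hesc, pvTokBytes, ih]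
    | [x], _ => simp [hesc, pvTokBytes, ih]
    | x :: y :: r, hs => exact absurd rfl (by intro hh; exact hs x y r hh)
  | case7 d1 rest1 hshape hesc ih =>
    rw [pvALoop.eq_def, pvTokenize.eq_def]
    match rest1, hshape with
    | [], _ => simp [hesc, pvTokBytes, ih]
    | [x], _ => simp [hesc, pvTokBytes, ih]
    | x :: y :: r, hs => exact absurd rfl (by intro hh; exact hs x y r hh)
  | case8 c rest h0 h3 h1 ih =>
    have hc : c ≠ '\\' := by
      intro hcc
      match rest with
      | [] => exact h0 hcc rfl
      | d1 :: rest1 => exact h1 d1 rest1 hcc rfl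
    rw [pvTokenize.eq_def]
    have hrest := (List.takeWhile_append_dropWhile (p := fun x => x != '\\') (l := rest)).symm
    conv_lhs => rw [pvALoop.eq_def]
    simp only [if_neg hc]
    conv_lhs => rw [hrest]
    rw [pvALoop_run _ _ (fun x hx => by
      have := List.mem_takeWhile_imp hx
      simpa using this)]
    simp only [List.flatMap_cons, pvTokBytes, ih, List.append_assoc]

-- ===== VERDICT (by name: the statement is the Claim_ definition above) =====
theorem unquote_diff_path_py_spec : Claim_equal_unquote_diff_path_py := by
  intro inner _
  unfold Spec_unquote_diff_path_py unquote_diff_path_py unquote_diff_path_py_alt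
  rw [pvLoop_eq]
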